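-- pv_equiv track=rewrite | github.com/jfcorreas/image_colors_labeler | detect_lines.py | get_draw_guide
-- ===== SOURCE A (Python) =====
-- def get_draw_guide(coord: list):
--     guide = [None]*2
--     min_difference = coord[len(coord)-1]*10
--     last_point = 0
--     for point in coord:
--         diff = point - last_point
--         if min_difference is not None and diff < min_difference:
--             guide[0] = point
--             guide[1] = diff
--             min_difference = diff
--         last_point = point
--     return guide
-- ===== SOURCE B (Python) =====
-- def get_draw_guide(coord: list):
--     diffs = [coord[0]] + [b - a for a, b in zip(coord, coord[1:])]
--     m = min(diffs)
--     if m < coord[-1] * 10: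
--         return [coord[diffs.index(m)], m]
--     return [None, None]
-- ===== Notes on version B (the rewrite author's own statement) =====
-- stated objective: alternative
-- what changed: A's single fused scan with a running minimum and last_point state is replaced by a build-the-consecutive-difference-table first, then min() and .index() to locate the answer (same first-occurrence tie-break and threshold).
import Mathlib
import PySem

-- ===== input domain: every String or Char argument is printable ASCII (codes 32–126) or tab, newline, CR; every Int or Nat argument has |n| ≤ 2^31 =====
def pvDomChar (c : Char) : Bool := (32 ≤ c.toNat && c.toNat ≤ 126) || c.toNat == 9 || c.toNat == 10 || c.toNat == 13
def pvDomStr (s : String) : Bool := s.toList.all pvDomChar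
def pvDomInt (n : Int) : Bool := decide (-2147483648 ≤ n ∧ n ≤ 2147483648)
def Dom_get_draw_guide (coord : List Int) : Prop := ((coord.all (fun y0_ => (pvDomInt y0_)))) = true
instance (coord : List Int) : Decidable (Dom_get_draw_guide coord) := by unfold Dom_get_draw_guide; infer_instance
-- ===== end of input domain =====

-- B replaces A's fused scan-with-running-minimum by a build-the-difference-table, min, index decomposition (objective: alternative, same cost).

-- ===== PORT A =====
-- the for-loop of A: state = (guide0, guide1), min_difference, last_point
def get_draw_guide_loop (coord : List Int) (guide : Option Int × Option Int)
    (min_difference last_point : Int) : Option Int × Option Int :=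
  match coord with
  | [] => guide
  | point :: rest =>
    let diff := point - last_point
    if diff < min_difference then
      get_draw_guide_loop rest (some point, some diff) diff point
    else
      get_draw_guide_loop rest guide min_difference point

def get_draw_guide (coord : List Int) : List (Option Int) :=
  -- coord[len(coord)-1]: IndexError (none) exactly when coord = []; excluded by Pre_
  match PySem.List.pyGet? coord ((coord.length : Int) - 1) with
  | none => [none, none]
  | some last =>
    let p := get_draw_guide_loop coord (none, none) (last * 10) 0
    [p.1, p.2]

-- ===== PORT B =====
def get_draw_guide_alt (coord : List Int) : List (Option Int) :=
  match coord with
  | [] => [none, none]   -- coord[0] raises IndexError in Python here; excluded by Pre_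
  | c0 :: rest =>
    let diffs := c0 :: (((c0 :: rest).zip rest).map (fun ab => ab.2 - ab.1))
    match PySem.List.min? diffs (fun x => x) with
    | none => [none, none]   -- unreachable: diffs is nonempty
    | some m =>
      if m < PySem.List.pyGetD coord (-1) 0 * 10 then
        match PySem.List.index? diffs m with
        | none => [none, none]   -- unreachable: m ∈ diffs
        | some i => [some (PySem.List.pyGetD coord (i : Int) 0), some m]
      else [none, none]

-- ===== PRECONDITION & SPEC =====
-- A raises IndexError on [] (coord[len(coord)-1]); Pre_ excludes exactly the empty list.
def Pre_get_draw_guide (coord : List Int) : Prop := coord ≠ []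
instance (coord : List Int) : Decidable (Pre_get_draw_guide coord) := by unfold Pre_get_draw_guide; infer_instance
def pvWitness_get_draw_guide : List Int := [3, 5, 6, 100]

def Spec_get_draw_guide (coord : List Int) (out : List (Option Int)) : Prop := out = get_draw_guide_alt coord
instance (coord : List Int) (out : List (Option Int)) : Decidable (Spec_get_draw_guide coord out) := by unfold Spec_get_draw_guide; infer_instance

-- ===== CLAIM (what is proved, stated in full; the proofs are below) =====
def Claim_equal_get_draw_guide : Prop := ∀ (coord : List Int), Dom_get_draw_guide coord → Pre_get_draw_guide coord → Spec_get_draw_guide coord (get_draw_guide coord)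

-- ===== LEMMAS AND PROOFS =====

-- the consecutive differences of a list, starting from last_point p
def dfrom (p : Int) : List Int → List Int
  | [] => []
  | c :: r => (c - p) :: dfrom c r

-- B's selection, as a pair: min over D, first index, point from C
def sel (D C : List Int) (g : Option Int × Option Int) (mind : Int) : Option Int × Option Int :=
  match PySem.List.min? D (fun x => x) with
  | none => g
  | some m =>
    if m < mind then
      match PySem.List.index? D m with
      | none => g
      | some i => (some (PySem.List.pyGetD C (i : Int) 0), some m)
    else g

theorem pyGetD_shift (q : Int) (r' : List Int) (i : Nat) :
    PySem.List.pyGetD (q :: r') ((i + 1 : Nat) : Int) 0 = PySem.List.pyGetD r' (i : Int) 0 := by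
  simp only [PySem.List.pyGetD_natCast, List.getD_cons_succ]

theorem sel_cons (d : Int) (D' : List Int) (q : Int) (r' : List Int)
    (g : Option Int × Option Int) (mind : Int) :
    sel (d :: D') (q :: r') g mind =
      if d < mind then sel D' r' (some q, some d) d else sel D' r' g mind := by
  cases D' with
  | nil =>
    simp only [sel, PySem.List.min?_id_cons, List.foldl, PySem.List.index?_cons_self]
    split_ifs with h <;> (split <;> simp_all [PySem.List.min?])
  | cons x t =>
    have hm' : PySem.List.min? (x :: t) (fun y => y) = some (t.foldl min x) :=
      PySem.List.min?_id_cons x t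
    have hM : PySem.List.min? (d :: x :: t) (fun y => y) = some (min d (t.foldl min x)) := by
      rw [PySem.List.min?_id_cons]
      congr 1
      exact List.foldl_assoc ..
    by_cases hlt : t.foldl min x < d
    · have hmem : t.foldl min x ∈ x :: t := PySem.List.min?_mem hm'
      obtain ⟨i', hi'⟩ := Option.isSome_iff_exists.mp ((PySem.List.index?_isSome_iff (x :: t) _).mpr hmem)
      have hidx : PySem.List.index? (d :: x :: t) (t.foldl min x) = some (i' + 1) := by
        rw [PySem.List.index?_cons_of_ne _ (ne_of_gt hlt), hi']; rfl
      rw [min_eq_right (le_of_lt hlt)] at hM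
      simp only [sel, hm', hM, hidx, hi']
      split_ifs with h1 h2 h3 <;> first | rfl | omega | exact congrArg (fun z => (some z, some (t.foldl min x))) (pyGetD_shift q r' i')
    · rw [min_eq_left (by omega)] at hM
      simp only [sel, hm', hM, PySem.List.index?_cons_self]
      split_ifs with h1 h2 <;> first | rfl | omega | simp

theorem loop_eq_sel (r : List Int) (p mind : Int) (g : Option Int × Option Int) :
    get_draw_guide_loop r g mind p = sel (dfrom p r) r g mind := by
  induction r generalizing p mind g with
  | nil => rfl
  | cons q r' ih =>
    simp only [get_draw_guide_loop, dfrom, sel_cons]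
    split_ifs with h
    · exact ih _ _ _
    · exact ih _ _ _

theorem dfrom_eq_zip (c0 : Int) (rest : List Int) :
    dfrom c0 rest = ((c0 :: rest).zip rest).map (fun ab => ab.2 - ab.1) := by
  induction rest generalizing c0 with
  | nil => rfl
  | cons c1 r ih => simp [dfrom, ih c1]

theorem sel_as_list (D C : List Int) (mind : Int) :
    [(sel D C (none, none) mind).1, (sel D C (none, none) mind).2] =
      (match PySem.List.min? D (fun x => x) with
       | none => [none, none]
       | some m =>
         if m < mind then
           match PySem.List.index? D m with
           | none => [none, none]
           | some i => [some (PySem.List.pyGetD C (i : Int) 0), some m]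
         else [none, none]) := by
  cases hm : PySem.List.min? D (fun x => x) with
  | none => simp only [sel, hm]
  | some m =>
    simp only [sel, hm]
    split_ifs with h
    · cases PySem.List.index? D m <;> rfl
    · rfl

-- ===== VERDICT (by name: the statement is the Claim_ definition above) =====
theorem get_draw_guide_spec : Claim_equal_get_draw_guide := by
  intro coord _ hpre
  unfold Spec_get_draw_guide
  cases coord with
  | nil => exact absurd rfl hpre
  | cons c0 rest =>
    have hne : (c0 :: rest) ≠ ([] : List Int) := List.cons_ne_nil _ _
    have hlen : (((c0 :: rest).length : Int)) - 1 = ((rest.length : Nat) : Int) := by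
      simp
    have hlast : PySem.List.pyGet? (c0 :: rest) (((c0 :: rest).length : Int) - 1) =
        some ((c0 :: rest).getLast hne) := by
      rw [hlen, PySem.List.pyGet?_natCast, ← List.getLast?_eq_some_getLast hne,
        List.getLast?_eq_getElem?]
      simp
    have hB : PySem.List.pyGetD (c0 :: rest) (-1) 0 = (c0 :: rest).getLast hne :=
      PySem.List.pyGetD_neg_one _ 0 hne
    have hdf : dfrom 0 (c0 :: rest) =
        c0 :: (((c0 :: rest).zip rest).map (fun ab => ab.2 - ab.1)) := by
      simp [dfrom, dfrom_eq_zip]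
    unfold get_draw_guide get_draw_guide_alt
    simp only [hlast, hB, loop_eq_sel, hdf.symm]
    exact sel_as_list (dfrom 0 (c0 :: rest)) (c0 :: rest) ((c0 :: rest).getLast hne * 10)
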